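-- pv_equiv track=rewrite | github.com/JRJRJPRO/NSTF-release | qa_system/core/retriever_nstf.py | _find_common_themes
-- ===== SOURCE A (Python) =====
-- from typing import Dict, List, Tuple, Optional, Any
--
-- def _find_common_themes(goals: List[str]) -> List[str]:
--     """从目标列表中找出共同主题"""
--     # 简单实现：找高频词
--     word_counts = {}
--     stop_words = {'the', 'a', 'an', 'to', 'for', 'of', 'in', 'on', 'with', 'and'}
--
--     for goal in goals:
--         words = goal.lower().split()
--         for word in words:
--             if word not in stop_words and len(word) > 3:
--                 word_counts[word] = word_counts.get(word, 0) + 1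
--
--     # 返回出现多次的词
--     common = [w for w, c in word_counts.items() if c >= 2]
--     return common[:3]  # 最多返回3个
-- ===== SOURCE B (Python) =====
-- def _find_common_themes(goals):
--     """Two-pass re-implementation: flatten the qualifying words once, count them,
--     then scan the word stream again with a seen-set, stopping as soon as 3 themes are found."""
--     stop_words = {'the', 'a', 'an', 'to', 'for', 'of', 'in', 'on', 'with', 'and'}
--     words = [w for g in goals for w in g.lower().split()
--              if w not in stop_words and len(w) > 3]
--     counts = {}
--     for w in words:
--         counts[w] = counts.get(w, 0) + 1
--     result = []
--     seen = set()
--     for w in words: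
--         if len(result) == 3:
--             break
--         if counts[w] >= 2 and w not in seen:
--             seen.add(w)
--             result.append(w)
--     return result
-- ===== Notes on version B (the rewrite author's own statement) =====
-- stated objective: alternative
-- what changed: Replaces the dict-items filter-then-slice with a second early-exit scan over the cached word stream that maintains a seen set and stops as soon as three frequent words are collected.
import Mathlib
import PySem

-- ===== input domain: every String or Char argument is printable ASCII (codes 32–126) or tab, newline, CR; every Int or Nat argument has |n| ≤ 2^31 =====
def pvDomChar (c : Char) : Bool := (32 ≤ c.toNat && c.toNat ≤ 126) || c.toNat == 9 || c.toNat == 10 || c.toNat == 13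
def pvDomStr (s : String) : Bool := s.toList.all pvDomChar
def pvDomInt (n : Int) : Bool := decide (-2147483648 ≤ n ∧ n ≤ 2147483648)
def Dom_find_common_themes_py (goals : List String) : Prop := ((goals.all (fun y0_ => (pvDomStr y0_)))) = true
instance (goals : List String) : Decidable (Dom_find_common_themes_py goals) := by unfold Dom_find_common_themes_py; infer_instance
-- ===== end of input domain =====

-- B replaces A's dict-items filter-then-slice with a second early-exit scan over the cached
-- qualifying-word stream (seen set, stop at 3 results); same values, different decomposition.


-- the Python stop-word set literal (shared by both ports)
def pvStopSet : PySem.Set String :=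
  PySem.Set.ofList ["the", "a", "an", "to", "for", "of", "in", "on", "with", "and"]

-- 'word not in stop_words and len(word) > 3' (identical condition in both Pythons)
def pvKeep (w : String) : Bool := !(pvStopSet.contains w) && decide (PySem.Str.len w > 3)

-- ===== PORT A =====
def find_common_themes_py (goals : List String) : List String :=
  let word_counts : PySem.Dict String Int :=
    goals.foldl (fun wc goal =>
      (PySem.Str.split₀ (PySem.Str.lower goal)).foldl (fun wc word =>
        if pvKeep word then wc.insert word (wc.getD word 0 + 1) else wc) wc)
      PySem.Dict.empty
  let common := (word_counts.items.filter (fun p => p.2 ≥ 2)).map Prod.fst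
  PySem.List.slice common none (some 3)

-- ===== PORT B =====
-- the 'for w in words: …' loop of B, with its break at len(result) == 3
def pvScan (counts : PySem.Dict String Int) :
    List String → List String → PySem.Set String → List String
  | [], result, _ => result
  | w :: ws, result, seen =>
    if result.length = 3 then result
    else if counts.getD w 0 ≥ 2 ∧ ¬ (seen.contains w = true) then
      pvScan counts ws (result ++ [w]) (PySem.Set.add seen w)
    else pvScan counts ws result seen

def find_common_themes_py_alt (goals : List String) : List String :=
  let words := goals.flatMap (fun g => (PySem.Str.split₀ (PySem.Str.lower g)).filter pvKeep)
  let counts := PySem.Dict.counter words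
  pvScan counts words [] PySem.Set.empty

-- ===== PRECONDITION & SPEC =====
def Spec_find_common_themes_py (goals : List String) (out : List String) : Prop := out = find_common_themes_py_alt goals
instance (goals : List String) (out : List String) : Decidable (Spec_find_common_themes_py goals out) := by unfold Spec_find_common_themes_py; infer_instance

-- ===== CLAIM (what is proved, stated in full; the proofs are below) =====
def Claim_equal_find_common_themes_py : Prop := ∀ (goals : List String), Dom_find_common_themes_py goals → Spec_find_common_themes_py goals (find_common_themes_py goals)

-- ===== LEMMAS AND PROOFS =====

-- first occurrences in ws that are not in seen
def pvDF (seen : List String) : List String → List String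
  | [] => []
  | w :: ws => if w ∈ seen then pvDF seen ws else w :: pvDF (w :: seen) ws

-- filtered pvDF only depends on the q-part of seen
theorem pvDF_filter_congr (q : String → Bool) :
    ∀ (ws s1 s2 : List String), (∀ x, q x = true → (x ∈ s1 ↔ x ∈ s2)) →
      (pvDF s1 ws).filter q = (pvDF s2 ws).filter q := by
  intro ws
  induction ws with
  | nil => intro s1 s2 _; rfl
  | cons w ws ih =>
    intro s1 s2 h
    by_cases hq : q w = true
    · have hmem : w ∈ s1 ↔ w ∈ s2 := h w hq
      by_cases h1 : w ∈ s1
      · simp only [pvDF, if_pos h1, if_pos (hmem.mp h1)]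
        exact ih s1 s2 h
      · have h2 : w ∉ s2 := fun hc => h1 (hmem.mpr hc)
        simp only [pvDF, if_neg h1, if_neg h2, List.filter_cons, hq]
        rw [ih (w :: s1) (w :: s2) (fun x hx => by simp [h x hx])]
    · have hstep : ∀ (s : List String), (pvDF s (w :: ws)).filter q =
          (pvDF (w :: s) ws).filter q := by
        intro s
        by_cases hm : w ∈ s
        · simp only [pvDF, if_pos hm]
          exact ih s (w :: s) (fun x hx => by
            constructor
            · intro h'; exact List.mem_cons_of_mem _ h'
            · intro h'; rcases List.mem_cons.mp h' with h' | h'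
              · subst h'; exact hm
              · exact h')
        · simp only [pvDF, if_neg hm, List.filter_cons]
          simp [hq]
      rw [hstep s1, hstep s2]
      exact ih (w :: s1) (w :: s2) (fun x hx => by
        have := h x hx; simp [this])

theorem pvDF_congr : ∀ (ws s1 s2 : List String), (∀ x, x ∈ s1 ↔ x ∈ s2) →
    pvDF s1 ws = pvDF s2 ws := by
  intro ws s1 s2 h
  have := pvDF_filter_congr (fun _ => true) ws s1 s2 (fun x _ => h x)
  simpa [List.filter_true] using this

theorem pvOfList_acc : ∀ (ws seen : List String),
    List.foldl PySem.Set.add seen ws = seen ++ pvDF seen ws := by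
  intro ws
  induction ws with
  | nil => intro seen; simp [pvDF]
  | cons w ws ih =>
    intro seen
    by_cases hm : w ∈ seen
    · have hadd : PySem.Set.add seen w = seen := by
        simp [PySem.Set.add, PySem.Set.contains, hm]
      rw [List.foldl_cons, hadd, ih seen]
      simp only [pvDF, if_pos hm]
    · have hadd : PySem.Set.add seen w = seen ++ [w] := by
        simp [PySem.Set.add, PySem.Set.contains, hm]
      rw [List.foldl_cons, hadd, ih (seen ++ [w])]
      simp only [pvDF, if_neg hm, List.append_assoc, List.singleton_append]
      rw [pvDF_congr ws (seen ++ [w]) (w :: seen) (fun x => by simp; tauto)]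

theorem pvScan_spec (d : PySem.Dict String Int) :
    ∀ (ws res : List String), res.length ≤ 3 →
      (∀ w ∈ res, d.getD w 0 ≥ 2) →
      pvScan d ws res res =
        (res ++ (pvDF res ws).filter (fun w => decide (d.getD w 0 ≥ 2))).take 3 := by
  intro ws
  induction ws with
  | nil =>
    intro res hlen _
    simp [pvScan, pvDF, List.take_of_length_le hlen]
  | cons w ws ih =>
    intro res hlen hall
    by_cases h3 : res.length = 3
    · rw [List.take_append, List.take_of_length_le hlen, h3]
      simp [pvScan, h3]
    · have hlt : res.length < 3 := lt_of_le_of_ne hlen h3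
      by_cases hm : w ∈ res
      · -- w already collected: condition fails via seen, pvDF drops it too
        have hc : PySem.Set.contains res w = true := by
          simp [PySem.Set.contains, hm]
        have hcond : ¬ (d.getD w 0 ≥ 2 ∧ ¬ (PySem.Set.contains res w = true)) := by
          intro h; exact h.2 hc
        simp only [pvScan, if_neg h3, if_neg hcond]
        simp only [pvDF, if_pos hm]
        exact ih res hlen hall
      · have hc : ¬ PySem.Set.contains res w = true := by
          simp [PySem.Set.contains, hm]
        by_cases hp : d.getD w 0 ≥ 2
        · -- append w
          have hcond : d.getD w 0 ≥ 2 ∧ ¬ (PySem.Set.contains res w = true) := ⟨hp, hc⟩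
          simp only [pvScan, if_neg h3, if_pos hcond]
          have hadd : PySem.Set.add res w = res ++ [w] := by
            simp [PySem.Set.add, PySem.Set.contains, hm]
          rw [hadd]
          have hlen2 : (res ++ [w]).length ≤ 3 := by simp; omega
          have hall2 : ∀ x ∈ res ++ [w], d.getD x 0 ≥ 2 := by
            intro x hx
            rcases List.mem_append.mp hx with hx | hx
            · exact hall x hx
            · simp at hx; subst hx; exact hp
          rw [ih (res ++ [w]) hlen2 hall2]
          simp only [pvDF, if_neg hm, List.filter_cons, decide_eq_true hp, if_true,
            List.append_assoc, List.singleton_append]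
          rw [pvDF_filter_congr (fun w => decide (d.getD w 0 ≥ 2)) ws
            (res ++ [w]) (w :: res) (fun x _ => by simp; tauto)]
        · -- count too small: skipped on both sides
          have hcond : ¬ (d.getD w 0 ≥ 2 ∧ ¬ (PySem.Set.contains res w = true)) := by
            intro h; exact hp h.1
          simp only [pvScan, if_neg h3, if_neg hcond]
          rw [ih res hlen hall]
          have hpd : decide (d.getD w 0 ≥ 2) = false := by simp [hp]
          simp only [pvDF, if_neg hm, List.filter_cons, hpd, Bool.false_eq_true, if_false]
          rw [pvDF_filter_congr (fun w => decide (d.getD w 0 ≥ 2)) ws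
            (w :: res) res (fun x hx => by
              simp only [List.mem_cons]
              constructor
              · rintro (rfl | h2)
                · exfalso; simp at hx; exact hp hx
                · exact h2
              · intro h2; exact Or.inr h2)]

-- ===== VERDICT (by name: the statement is the Claim_ definition above) =====
theorem find_common_themes_py_spec : Claim_equal_find_common_themes_py := by
  unfold Claim_equal_find_common_themes_py
  intro goals _
  unfold Spec_find_common_themes_py
  simp only [find_common_themes_py, find_common_themes_py_alt]
  set words := goals.flatMap (fun g => (PySem.Str.split₀ (PySem.Str.lower g)).filter pvKeep)
    with hwords
  -- A's dict is Counter(words)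
  have hdict : goals.foldl (fun wc goal =>
      (PySem.Str.split₀ (PySem.Str.lower goal)).foldl (fun wc word =>
        if pvKeep word then wc.insert word (wc.getD word 0 + 1) else wc) wc)
      PySem.Dict.empty = PySem.Dict.counter words := by
    rw [← PySem.Dict.foldl_insert_getD_add_one_eq_counter, hwords, List.foldl_flatMap]
    congr 1
    funext acc g
    rw [List.foldl_filter]
  rw [hdict]
  -- A's comprehension over items, then [:3]
  rw [PySem.Dict.items_counter, List.filter_map, List.map_map]
  rw [PySem.List.slice_to _ (by norm_num)]
  -- B's scan
  have hempty : (PySem.Set.empty : PySem.Set String) = ([] : List String) := rfl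
  rw [hempty]
  rw [pvScan_spec (PySem.Dict.counter words) words [] (by simp) (by simp)]
  have hdf : pvDF [] words = PySem.Set.ofList words := by
    rw [PySem.Set.ofList, hempty, pvOfList_acc words []]
    rfl
  rw [hdf]
  simp only [List.nil_append]
  congr 1
  have hfil : (fun w => decide ((PySem.Dict.counter words).getD w 0 ≥ 2)) =
      (fun w => decide (((words.count w : Int)) ≥ 2)) := by
    funext w; rw [PySem.Dict.getD_counter]
  rw [hfil]
  have hcomp : ((fun p => decide (p.2 ≥ 2)) ∘ fun k => (k, (words.count k : Int))) =
      (fun w => decide (((words.count w : Int)) ≥ 2)) := rfl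
  rw [hcomp]
  have hid : (Prod.fst ∘ fun k => (k, ((List.count k words : Int)))) = id := rfl
  rw [hid, List.map_id]
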